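-- pv_equiv track=rewrite | github.com/AMohn9/AdventOfCode | 2021/day_10.py | score_invalid_line
-- ===== SOURCE A (Python) =====
-- from collections import deque
--
-- INVALID_CHARACTER_SCORES = {
--     ')': 3,
--     ']': 57,
--     '}': 1197,
--     '>': 25137,
-- }
--
-- CLOSING_CHARACTERS = {
--     ')': '(',
--     ']': '[',
--     '}': '{',
--     '>': '<',
-- }
--
-- def score_invalid_line(line: str) -> int:
--     stack = deque()
--     for character in line:
--         if character in CLOSING_CHARACTERS:
--             if len(stack) == 0 or stack.pop() != CLOSING_CHARACTERS[character]:
--                 return INVALID_CHARACTER_SCORES[character]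
--         else:
--             stack.append(character)
--     return 0
-- ===== SOURCE B (Python) =====
-- INVALID_CHARACTER_SCORES = {
--     ')': 3,
--     ']': 57,
--     '}': 1197,
--     '>': 25137,
-- }
--
-- MATCHED_PAIRS = ("()", "[]", "{}", "<>")
--
-- def score_invalid_line(line: str) -> int:
--     s = line
--     while True:
--         t = s
--         for pair in MATCHED_PAIRS:
--             t = t.replace(pair, "")
--         if t == s:
--             break
--         s = t
--     for character in s:
--         if character in INVALID_CHARACTER_SCORES:
--             return INVALID_CHARACTER_SCORES[character]
--     return 0
-- ===== Notes on version B (the rewrite author's own statement) =====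
-- stated objective: alternative
-- what changed: B keeps no stack: it repeatedly deletes every adjacent matched bracket pair via str.replace until the string stops changing, then returns the score of the first closing bracket left (0 if none), instead of A's single pass with an explicit deque of openers.
import Mathlib
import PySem

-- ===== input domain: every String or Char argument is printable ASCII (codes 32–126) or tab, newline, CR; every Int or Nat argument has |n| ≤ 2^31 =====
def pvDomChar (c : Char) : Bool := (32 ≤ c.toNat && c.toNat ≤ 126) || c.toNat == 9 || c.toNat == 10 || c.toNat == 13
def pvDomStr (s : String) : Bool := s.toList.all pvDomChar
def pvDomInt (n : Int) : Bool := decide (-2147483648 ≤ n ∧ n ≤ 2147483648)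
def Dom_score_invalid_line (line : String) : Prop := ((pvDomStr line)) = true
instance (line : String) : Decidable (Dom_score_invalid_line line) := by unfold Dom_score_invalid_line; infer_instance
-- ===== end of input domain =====

-- B replaces A's explicit stack by repeated deletion of adjacent matched pairs until a
-- fixpoint, then scores the first remaining closing bracket (objective: alternative).

-- ===== PORT A =====
-- CLOSING_CHARACTERS lookup: some opener iff c is a closing bracket
def closingMatch? (c : Char) : Option Char :=
  if c = ')' then some '(' else if c = ']' then some '[' else
  if c = '}' then some '{' else if c = '>' then some '<' else none

-- INVALID_CHARACTER_SCORES lookup (only ever applied to the four closers)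
def invalidScore (c : Char) : Int :=
  if c = ')' then 3 else if c = ']' then 57 else
  if c = '}' then 1197 else if c = '>' then 25137 else 0

-- the for-loop with early return; stack head = right end of the deque
def goA : List Char → List Char → Int
  | [], _ => 0
  | c :: rest, stack =>
    match closingMatch? c with
    | some m =>
      match stack with
      | [] => invalidScore c
      | top :: s => if top ≠ m then invalidScore c else goA rest s
    | none => goA rest (c :: stack)

def score_invalid_line (line : String) : Int := goA line.toList []

-- ===== PORT B =====
-- t.replace(ab, "") for the two-character pattern a·b: greedy left-to-right deletion
def repB (a b : Char) : List Char → List Char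
  | [] => []
  | [c] => [c]
  | c :: d :: t => if c = a ∧ d = b then repB a b t else c :: repB a b (d :: t)

-- one pass of the inner for-loop over MATCHED_PAIRS
def stepB (s : List Char) : List Char :=
  repB '<' '>' (repB '{' '}' (repB '[' ']' (repB '(' ')' s)))

theorem repB_length_le (a b : Char) (s : List Char) : (repB a b s).length ≤ s.length := by
  fun_induction repB a b s with
  | case1 => exact Nat.le_refl _
  | case2 => exact Nat.le_refl _
  | case3 c d t h ih => simp only [List.length_cons] at *; omega
  | case4 c d t h ih => simp only [List.length_cons] at *; omega

theorem repB_eq_or_lt (a b : Char) (s : List Char) :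
    repB a b s = s ∨ (repB a b s).length < s.length := by
  fun_induction repB a b s with
  | case1 => left; rfl
  | case2 => left; rfl
  | case3 c d t h ih =>
    right
    have := repB_length_le a b t
    simp only [List.length_cons] at *
    omega
  | case4 c d t h ih =>
    rcases ih with h1 | h1
    · left; rw [h1]
    · right; simp only [List.length_cons] at *; omega

theorem stepB_lt_of_ne (s : List Char) (h : stepB s ≠ s) : (stepB s).length < s.length := by
  unfold stepB at *
  rcases repB_eq_or_lt '(' ')' s with h1 | h1 <;>
  rcases repB_eq_or_lt '[' ']' (repB '(' ')' s) with h2 | h2 <;>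
  rcases repB_eq_or_lt '{' '}' (repB '[' ']' (repB '(' ')' s)) with h3 | h3 <;>
  rcases repB_eq_or_lt '<' '>' (repB '{' '}' (repB '[' ']' (repB '(' ')' s))) with h4 | h4 <;>
  first
    | (exfalso; apply h; rw [h4, h3, h2, h1])
    | (have l1 := repB_length_le '(' ')' s
       have l2 := repB_length_le '[' ']' (repB '(' ')' s)
       have l3 := repB_length_le '{' '}' (repB '[' ']' (repB '(' ')' s))
       have l4 := repB_length_le '<' '>' (repB '{' '}' (repB '[' ']' (repB '(' ')' s)))
       omega)

-- the while-loop: repeat until the string no longer changes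
def fixB (s : List Char) : List Char :=
  let t := stepB s
  if h : t = s then s else fixB t
termination_by s.length
decreasing_by exact stepB_lt_of_ne s h

-- INVALID_CHARACTER_SCORES membership + lookup in the final scan
def closerScore? (c : Char) : Option Int :=
  if c = ')' then some 3 else if c = ']' then some 57 else
  if c = '}' then some 1197 else if c = '>' then some 25137 else none

-- the final for-loop with early return
def scanB : List Char → Int
  | [] => 0
  | c :: t =>
    match closerScore? c with
    | some v => v
    | none => scanB t

def score_invalid_line_alt (line : String) : Int := scanB (fixB line.toList)

-- ===== PRECONDITION & SPEC =====
def Spec_score_invalid_line (line : String) (out : Int) : Prop := out = score_invalid_line_alt line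
instance (line : String) (out : Int) : Decidable (Spec_score_invalid_line line out) := by unfold Spec_score_invalid_line; infer_instance

-- ===== CLAIM (what is proved, stated in full; the proofs are below) =====
def Claim_equal_score_invalid_line : Prop := ∀ (line : String), Dom_score_invalid_line line → Spec_score_invalid_line line (score_invalid_line line)

-- ===== LEMMAS AND PROOFS =====

-- deleting one kind of adjacent matched pair does not change A's result, whatever the stack
theorem goA_repB (a b : Char) (hb : closingMatch? b = some a) (ha : closingMatch? a = none)
    (s : List Char) : ∀ st, goA (repB a b s) st = goA s st := by
  fun_induction repB a b s with
  | case1 => intro st; rfl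
  | case2 => intro st; rfl
  | case3 c d t h ih =>
    intro st
    obtain ⟨hc, hd⟩ := h
    subst hc; subst hd
    have R1 : goA (c :: d :: t) st = goA t st := by simp [goA, ha, hb]
    rw [R1]; exact ih st
  | case4 c d t h ih =>
    intro st
    rw [goA.eq_def]
    conv_rhs => rw [goA.eq_def]
    cases hcm : closingMatch? c with
    | none => simp only [hcm]; exact ih _
    | some m =>
      cases st with
      | nil => simp [hcm]
      | cons top s' =>
        simp only [hcm]
        by_cases htop : top = m
        · simp only [htop, ne_eq, not_true_eq_false, if_false]
          exact ih _
        · simp [htop]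

theorem goA_stepB (s : List Char) (st : List Char) : goA (stepB s) st = goA s st := by
  unfold stepB
  rw [goA_repB '<' '>' rfl rfl, goA_repB '{' '}' rfl rfl,
      goA_repB '[' ']' rfl rfl, goA_repB '(' ')' rfl rfl]

theorem goA_fixB (s : List Char) : ∀ st, goA (fixB s) st = goA s st := by
  fun_induction fixB s with
  | case1 s t _ => intro st; rfl
  | case2 s t h ih => intro st; rw [ih st]; exact goA_stepB s st

-- an adjacent occurrence of the pair a·b
def hasPairB (a b : Char) : List Char → Bool
  | c :: d :: t => (c = a ∧ d = b) || hasPairB a b (d :: t)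
  | _ => false

theorem repB_fix_noPair (a b : Char) (s : List Char) (h : repB a b s = s) :
    hasPairB a b s = false := by
  fun_induction repB a b s with
  | case1 => rfl
  | case2 => rfl
  | case3 c d t hp ih =>
    exfalso
    have hl := repB_length_le a b t
    have := congrArg List.length h
    simp only [List.length_cons] at this
    omega
  | case4 c d t hp ih =>
    simp only [List.cons.injEq, true_and] at h
    simp [hasPairB, ih h, hp]

theorem fixB_step_eq (s : List Char) : stepB (fixB s) = fixB s := by
  fun_induction fixB s with
  | case1 s t h => exact h
  | case2 s t _ ih => exact ih

theorem fixB_noPairs (s : List Char) :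
    hasPairB '(' ')' (fixB s) = false ∧ hasPairB '[' ']' (fixB s) = false ∧
    hasPairB '{' '}' (fixB s) = false ∧ hasPairB '<' '>' (fixB s) = false := by
  have h := fixB_step_eq s
  unfold stepB at h
  set u := fixB s with hu
  have l1 := repB_length_le '(' ')' u
  have l2 := repB_length_le '[' ']' (repB '(' ')' u)
  have l3 := repB_length_le '{' '}' (repB '[' ']' (repB '(' ')' u))
  have l4 := repB_length_le '<' '>' (repB '{' '}' (repB '[' ']' (repB '(' ')' u)))
  have hlen : (repB '<' '>' (repB '{' '}' (repB '[' ']' (repB '(' ')' u)))).length = u.length := by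
    rw [h]
  have e1 : repB '(' ')' u = u := by
    rcases repB_eq_or_lt '(' ')' u with h1 | h1
    · exact h1
    · omega
  rw [e1] at h l2 l3 l4 hlen
  have e2 : repB '[' ']' u = u := by
    rcases repB_eq_or_lt '[' ']' u with h1 | h1
    · exact h1
    · omega
  rw [e2] at h l3 l4 hlen
  have e3 : repB '{' '}' u = u := by
    rcases repB_eq_or_lt '{' '}' u with h1 | h1
    · exact h1
    · omega
  rw [e3] at h
  exact ⟨repB_fix_noPair _ _ _ e1, repB_fix_noPair _ _ _ e2,
        repB_fix_noPair _ _ _ e3, repB_fix_noPair _ _ _ h⟩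

theorem closerScore?_none_of_no_match (c : Char) (h : closingMatch? c = none) :
    closerScore? c = none := by
  unfold closingMatch? at h
  unfold closerScore?
  split_ifs at h ⊢ <;> simp_all

theorem closerScore?_eq_invalidScore (c m : Char) (h : closingMatch? c = some m) :
    closerScore? c = some (invalidScore c) := by
  unfold closingMatch? at h
  unfold closerScore? invalidScore
  split_ifs at h ⊢ <;> simp_all

-- on a pair-free list, A's run from a compatible stack returns the first closer's score
theorem goA_eq_scanB (s : List Char)
    (h1 : hasPairB '(' ')' s = false) (h2 : hasPairB '[' ']' s = false)
    (h3 : hasPairB '{' '}' s = false) (h4 : hasPairB '<' '>' s = false) :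
    ∀ st, (∀ c m x, s = c :: x → closingMatch? c = some m → st.head? ≠ some m) →
      goA s st = scanB s := by
  induction s with
  | nil => intro st _; rfl
  | cons c x ih =>
    intro st hbd
    cases hcm : closingMatch? c with
    | some m =>
      have hscan : scanB (c :: x) = invalidScore c := by
        simp [scanB, closerScore?_eq_invalidScore c m hcm]
      cases st with
      | nil => simp [goA, hcm, hscan]
      | cons top s' =>
        have : top ≠ m := by
          intro he
          exact hbd c m x rfl hcm (by simp [he])
        simp [goA, hcm, this, hscan]
    | none =>
      have hx1 : hasPairB '(' ')' x = false := by
        cases x with | nil => rfl | cons d t => simp [hasPairB] at h1; tauto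
      have hx2 : hasPairB '[' ']' x = false := by
        cases x with | nil => rfl | cons d t => simp [hasPairB] at h2; tauto
      have hx3 : hasPairB '{' '}' x = false := by
        cases x with | nil => rfl | cons d t => simp [hasPairB] at h3; tauto
      have hx4 : hasPairB '<' '>' x = false := by
        cases x with | nil => rfl | cons d t => simp [hasPairB] at h4; tauto
      have hscan : scanB (c :: x) = scanB x := by
        simp [scanB, closerScore?_none_of_no_match c hcm]
      simp only [goA, hcm, hscan]
      apply ih hx1 hx2 hx3 hx4
      intro d m y hxy hdm
      subst hxy
      simp only [List.head?_cons, ne_eq, Option.some.injEq]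
      intro hcmeq
      subst hcmeq
      -- c would form a matched adjacent pair with d, contradicting pair-freeness
      unfold closingMatch? at hdm
      split_ifs at hdm <;> simp_all [hasPairB] <;>
        first
          | exact h1.1 hdm.symm | exact h2.1 hdm.symm
          | exact h3.1 hdm.symm | exact h4.1 hdm.symm

-- ===== VERDICT (by name: the statement is the Claim_ definition above) =====
theorem score_invalid_line_spec : Claim_equal_score_invalid_line := by
  intro line _
  unfold Spec_score_invalid_line score_invalid_line score_invalid_line_alt
  obtain ⟨h1, h2, h3, h4⟩ := fixB_noPairs line.toList
  rw [← goA_fixB line.toList []]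
  exact goA_eq_scanB _ h1 h2 h3 h4 [] (by intro c m x _ _; simp)
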